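-- pv_equiv track=rewrite | github.com/olachinkei/BioReason-Pro | scripts/build_ia_weights.py | count_parent_context_support
-- ===== SOURCE A (Python) =====
-- from collections import Counter, defaultdict
-- from typing import Dict, Iterable, List, Mapping, MutableMapping, Sequence, Set, Tuple
--
-- def count_parent_context_support(
--     protein_to_terms: Mapping[str, Set[str]],
--     go_metadata: Mapping[str, Mapping[str, object]],
-- ) -> Counter[str]:
--     counts: Counter[str] = Counter()
--     for go_id, metadata in go_metadata.items():
--         parents = tuple(metadata.get("parents", ()))
--         if not parents:
--             continue
--         support = 0
--         parent_set = set(parents)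
--         for assigned_terms in protein_to_terms.values():
--             if parent_set.issubset(assigned_terms):
--                 support += 1
--         counts[go_id] = support
--     return counts
-- ===== SOURCE B (Python) =====
-- from collections import Counter, defaultdict
--
--
-- def count_parent_context_support(protein_to_terms, go_metadata):
--     # Inverted index: term -> set of protein indices carrying that term.
--     index = defaultdict(set)
--     for i, terms in enumerate(protein_to_terms.values()):
--         for t in terms:
--             index[t].add(i)
--     counts = Counter()
--     for go_id, metadata in go_metadata.items():
--         parents = tuple(metadata.get("parents", ()))
--         if not parents:
--             continue
--         common = index.get(parents[0], set())
--         for p in parents[1:]: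
--             if not common:
--                 break
--             common = common & index.get(p, set())
--         counts[go_id] = len(common)
--     return counts
-- ===== Notes on version B (the rewrite author's own statement) =====
-- stated objective: alternative
-- what changed: Replaces the per-GO scan over all proteins with a precomputed inverted index term->protein-index set; each GO's support is the size of the intersection of its parents' posting sets, with an early exit when the running intersection is empty.
import Mathlib
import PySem

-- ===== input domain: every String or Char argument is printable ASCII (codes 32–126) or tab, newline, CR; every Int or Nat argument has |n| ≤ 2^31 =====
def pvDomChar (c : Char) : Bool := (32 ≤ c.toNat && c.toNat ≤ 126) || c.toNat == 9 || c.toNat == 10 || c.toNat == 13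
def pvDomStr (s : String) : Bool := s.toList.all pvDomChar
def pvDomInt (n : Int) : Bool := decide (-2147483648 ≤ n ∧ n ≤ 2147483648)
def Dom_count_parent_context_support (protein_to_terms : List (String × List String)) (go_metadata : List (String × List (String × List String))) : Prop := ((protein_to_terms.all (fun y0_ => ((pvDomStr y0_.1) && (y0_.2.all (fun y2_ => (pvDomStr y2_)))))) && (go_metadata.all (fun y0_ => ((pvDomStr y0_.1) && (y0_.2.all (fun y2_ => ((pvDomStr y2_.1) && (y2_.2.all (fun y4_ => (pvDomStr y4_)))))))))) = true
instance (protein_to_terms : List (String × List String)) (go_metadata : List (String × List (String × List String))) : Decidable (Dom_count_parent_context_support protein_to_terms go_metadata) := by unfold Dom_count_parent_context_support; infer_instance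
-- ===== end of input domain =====

-- B replaces A's per-GO scan over all proteins by a precomputed inverted index
-- (term -> set of protein indices); each GO's support is the size of the
-- intersection of its parents' posting sets (with an early exit when empty).

-- ===== PORT A =====
def count_parent_context_support (protein_to_terms : List (String × List String)) (go_metadata : List (String × List (String × List String))) : List (String × Int) :=
  (go_metadata.foldl
    (fun (counts : PySem.Dict String Int) e =>
      let parents := (PySem.Dict.mk e.2).getD "parents" []
      if parents.isEmpty then counts
      else
        let parentSet := PySem.Set.ofList parents
        counts.insert e.1
          (protein_to_terms.foldl
            (fun (support : Int) p =>
              if PySem.Set.issubset parentSet p.2 then support + 1 else support)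
            0))
    PySem.Dict.empty).items

-- ===== PORT B =====
-- index = defaultdict(set); for i, terms in enumerate(values): for t in terms: index[t].add(i)
def pvIndex (protein_to_terms : List (String × List String)) : PySem.Dict String (PySem.Set Int) :=
  (PySem.List.enumerate (protein_to_terms.map Prod.snd) 0).foldl
    (fun d q =>
      q.2.foldl (fun d t => d.modify t PySem.Set.empty (fun s => PySem.Set.add s q.1)) d)
    PySem.Dict.empty

-- for p in parents[1:]: if not common: break; common = common & index.get(p, set())
def pvInterLoop (idx : PySem.Dict String (PySem.Set Int)) : List String → PySem.Set Int → PySem.Set Int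
  | [], common => common
  | p :: rest, common =>
      if common.isEmpty then common
      else pvInterLoop idx rest (PySem.Set.inter common (idx.getD p PySem.Set.empty))

def count_parent_context_support_alt (protein_to_terms : List (String × List String)) (go_metadata : List (String × List (String × List String))) : List (String × Int) :=
  let idx := pvIndex protein_to_terms
  (go_metadata.foldl
    (fun (counts : PySem.Dict String Int) e =>
      match (PySem.Dict.mk e.2).getD "parents" [] with
      | [] => counts
      | p0 :: rest =>
          counts.insert e.1
            (PySem.Set.len (pvInterLoop idx rest (idx.getD p0 PySem.Set.empty))))
    PySem.Dict.empty).items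

-- ===== PRECONDITION & SPEC =====
def Spec_count_parent_context_support (protein_to_terms : List (String × List String)) (go_metadata : List (String × List (String × List String))) (out : List (String × Int)) : Prop := out = count_parent_context_support_alt protein_to_terms go_metadata
instance (protein_to_terms : List (String × List String)) (go_metadata : List (String × List (String × List String))) (out : List (String × Int)) : Decidable (Spec_count_parent_context_support protein_to_terms go_metadata out) := by unfold Spec_count_parent_context_support; infer_instance

-- ===== CLAIM (what is proved, stated in full; the proofs are below) =====
def Claim_equal_count_parent_context_support : Prop := ∀ (protein_to_terms : List (String × List String)) (go_metadata : List (String × List (String × List String))), Dom_count_parent_context_support protein_to_terms go_metadata → Spec_count_parent_context_support protein_to_terms go_metadata (count_parent_context_support protein_to_terms go_metadata)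

-- ===== LEMMAS AND PROOFS =====

-- index builder, inner loop: adding index i under every term of `terms`
theorem pv_inner_getD (terms : List String) (d : PySem.Dict String (PySem.Set Int)) (i : Int) (t : String) :
    (terms.foldl (fun d t' => d.modify t' PySem.Set.empty (fun s => PySem.Set.add s i)) d).getD t PySem.Set.empty
      = if t ∈ terms then PySem.Set.add (d.getD t PySem.Set.empty) i else d.getD t PySem.Set.empty := by
  induction terms generalizing d with
  | nil => simp
  | cons t' ts ih =>
      simp only [List.foldl_cons, ih, PySem.Dict.getD_modify, List.mem_cons]
      by_cases h1 : t = t' <;> by_cases h2 : t ∈ ts <;>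
        simp [h1, h2, PySem.Set.add_of_mem, PySem.Set.mem_add]

-- index builder, outer loop: the posting list of t is a fold of adds over the entries
theorem pv_outer_getD (l : List (Int × List String)) (d : PySem.Dict String (PySem.Set Int)) (t : String) :
    (l.foldl (fun d q => q.2.foldl (fun d t' => d.modify t' PySem.Set.empty (fun s => PySem.Set.add s q.1)) d) d).getD t PySem.Set.empty
      = l.foldl (fun s q => if t ∈ q.2 then PySem.Set.add s q.1 else s) (d.getD t PySem.Set.empty) := by
  induction l generalizing d with
  | nil => rfl
  | cons q l ih => simp only [List.foldl_cons, ih, pv_inner_getD]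

theorem pv_mem_addFold (l : List (Int × List String)) (t : String) (s0 : PySem.Set Int) (j : Int) :
    j ∈ l.foldl (fun s q => if t ∈ q.2 then PySem.Set.add s q.1 else s) s0
      ↔ j ∈ s0 ∨ ∃ q ∈ l, t ∈ q.2 ∧ j = q.1 := by
  induction l generalizing s0 with
  | nil => simp
  | cons q l ih =>
      simp only [List.foldl_cons]
      by_cases h : t ∈ q.2 <;>
        simp only [h, if_true, if_false, ih, PySem.Set.mem_add] <;> aesop

theorem pv_nodup_addFold (l : List (Int × List String)) (t : String) (s0 : PySem.Set Int) (h : s0.Nodup) :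
    (l.foldl (fun s q => if t ∈ q.2 then PySem.Set.add s q.1 else s) s0).Nodup := by
  induction l generalizing s0 with
  | nil => exact h
  | cons q l ih =>
      simp only [List.foldl_cons]
      by_cases hm : t ∈ q.2
      · simp only [hm, if_true]; exact ih _ (PySem.Set.nodup_add _ _ h)
      · simp only [hm, if_false]; exact ih _ h

theorem pv_mem_idx (pt : List (String × List String)) (t : String) (j : Int) :
    j ∈ (pvIndex pt).getD t PySem.Set.empty
      ↔ ∃ (k : Nat) (h : k < (pt.map Prod.snd).length), t ∈ (pt.map Prod.snd)[k] ∧ j = (k : Int) := by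
  unfold pvIndex
  rw [pv_outer_getD, pv_mem_addFold]
  simp only [PySem.Dict.getD_empty, PySem.List.mem_enumerate_iff]
  constructor
  · rintro (hj | ⟨q, ⟨k, hk, rfl⟩, hmem, rfl⟩)
    · simp [PySem.Set.empty] at hj
    · exact ⟨k, hk, hmem, by simp⟩
  · rintro ⟨k, hk, hmem, rfl⟩
    exact Or.inr ⟨((k : Int), (pt.map Prod.snd)[k]), ⟨k, hk, by simp⟩, hmem, rfl⟩

theorem pv_nodup_idx (pt : List (String × List String)) (t : String) :
    ((pvIndex pt).getD t PySem.Set.empty).Nodup := by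
  unfold pvIndex
  rw [pv_outer_getD]
  exact pv_nodup_addFold _ _ _ (by simp [PySem.Dict.getD_empty, PySem.Set.empty])

theorem pv_mem_interLoop (idx : PySem.Dict String (PySem.Set Int)) (ps : List String) (c : PySem.Set Int) (j : Int) :
    j ∈ pvInterLoop idx ps c ↔ j ∈ c ∧ ∀ p ∈ ps, j ∈ idx.getD p PySem.Set.empty := by
  induction ps generalizing c with
  | nil => simp [pvInterLoop]
  | cons p ps ih =>
      simp only [pvInterLoop]
      by_cases he : c.isEmpty
      · have : c = [] := List.isEmpty_iff.mp he
        subst this; simp [he]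
      · simp only [he]
        aesop

theorem pv_nodup_interLoop (idx : PySem.Dict String (PySem.Set Int)) (ps : List String) (c : PySem.Set Int) (h : c.Nodup) :
    (pvInterLoop idx ps c).Nodup := by
  induction ps generalizing c with
  | nil => exact h
  | cons p ps ih =>
      simp only [pvInterLoop]
      by_cases he : c.isEmpty
      · simp [he, h]
      · simp only [he]
        exact ih _ (PySem.Set.nodup_inter _ _ h)

theorem pv_countP_enumerate (tl : List (List String)) (f : List String → Bool) : ∀ s,
    (PySem.List.enumerate tl s).countP (fun q => f q.2) = tl.countP f := by
  induction tl with
  | nil => intro s; rfl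
  | cons x xs ih => intro s; simp [PySem.List.enumerate_cons, List.countP_cons, ih]

theorem pv_issubset_eq (ps : List String) (l : List String) :
    PySem.Set.issubset (PySem.Set.ofList ps) l = decide (∀ p ∈ ps, p ∈ l) := by
  rw [Bool.eq_iff_iff]
  simp [PySem.Set.issubset_iff, PySem.Set.mem_ofList]

-- per-GO agreement: the intersection size equals A's subset count
theorem pv_support_eq (pt : List (String × List String)) (p0 : String) (rest : List String) :
    PySem.Set.len (pvInterLoop (pvIndex pt) rest ((pvIndex pt).getD p0 PySem.Set.empty))
      = pt.foldl (fun (support : Int) p => if PySem.Set.issubset (PySem.Set.ofList (p0 :: rest)) p.2 then support + 1 else support) 0 := by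
  set tl := pt.map Prod.snd with htl
  have hmem : ∀ j, j ∈ pvInterLoop (pvIndex pt) rest ((pvIndex pt).getD p0 PySem.Set.empty)
      ↔ ∃ (k : Nat) (h : k < tl.length), j = (k : Int) ∧ ∀ p ∈ p0 :: rest, p ∈ tl[k] := by
    intro j
    rw [pv_mem_interLoop, pv_mem_idx]
    constructor
    · rintro ⟨⟨k, hk, hp0, rfl⟩, hrest⟩
      refine ⟨k, hk, rfl, ?_⟩
      intro p hp
      rcases List.mem_cons.mp hp with rfl | hp
      · exact hp0
      · rcases (pv_mem_idx pt p (k : Int)).mp (hrest p hp) with ⟨k', hk', hmem', hkk'⟩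
        have : k = k' := by exact_mod_cast hkk'
        subst this; exact hmem'
    · rintro ⟨k, hk, rfl, hall⟩
      refine ⟨⟨k, hk, hall p0 (List.mem_cons_self), rfl⟩, ?_⟩
      intro p hp
      exact (pv_mem_idx pt p (k : Int)).mpr ⟨k, hk, hall p (List.mem_cons_of_mem _ hp), rfl⟩
  set R := ((PySem.List.enumerate tl 0).filter
      (fun q => decide (∀ p ∈ p0 :: rest, p ∈ q.2))).map Prod.fst with hR
  have hmemR : ∀ j, j ∈ R ↔ ∃ (k : Nat) (h : k < tl.length), j = (k : Int) ∧ ∀ p ∈ p0 :: rest, p ∈ tl[k] := by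
    intro j
    rw [hR]
    simp only [List.mem_map, List.mem_filter, PySem.List.mem_enumerate_iff]
    constructor
    · rintro ⟨q, ⟨⟨k, hk, rfl⟩, hdec⟩, rfl⟩
      exact ⟨k, hk, by simp, by simpa using hdec⟩
    · rintro ⟨k, hk, rfl, hall⟩
      exact ⟨((k : Int), tl[k]), ⟨⟨k, hk, by simp⟩, by simpa using hall⟩, rfl⟩
  have hnodupR : R.Nodup := by
    have h := PySem.List.pairwise_lt_enumerate tl 0
    have h2 := List.Pairwise.filter (fun q => decide (∀ p ∈ p0 :: rest, p ∈ q.2)) h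
    exact (List.pairwise_map.mpr (h2.imp (fun hlt => ne_of_lt hlt)))
  have hperm : (pvInterLoop (pvIndex pt) rest ((pvIndex pt).getD p0 PySem.Set.empty)).Perm R := by
    refine (List.perm_ext_iff_of_nodup ?_ hnodupR).mpr (fun j => (hmem j).trans (hmemR j).symm)
    exact pv_nodup_interLoop _ _ _ (pv_nodup_idx pt p0)
  have hlen : PySem.Set.len (pvInterLoop (pvIndex pt) rest ((pvIndex pt).getD p0 PySem.Set.empty)) = (R.length : Int) := by
    have h := hperm.length_eq
    simp only [PySem.Set.len]
    exact_mod_cast h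
  have hRlen : R.length = tl.countP (fun ts => decide (∀ p ∈ p0 :: rest, p ∈ ts)) := by
    rw [hR, List.length_map, ← List.countP_eq_length_filter]
    exact pv_countP_enumerate tl (fun ts => decide (∀ p ∈ p0 :: rest, p ∈ ts)) 0
  rw [hlen, hRlen,
    PySem.List.foldl_if_add_one (fun p : String × List String => PySem.Set.issubset (PySem.Set.ofList (p0 :: rest)) p.2) pt 0,
    zero_add]
  simp only [pv_issubset_eq]
  rw [htl, List.countP_map]
  rfl

-- the two dict-building folds agree step by step
theorem pv_fold_eq (pt : List (String × List String)) (gm : List (String × List (String × List String))) (counts : PySem.Dict String Int) :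
    gm.foldl
      (fun (counts : PySem.Dict String Int) e =>
        if ((PySem.Dict.mk e.2).getD "parents" []).isEmpty then counts
        else
          counts.insert e.1
            (pt.foldl
              (fun (support : Int) p =>
                if PySem.Set.issubset (PySem.Set.ofList ((PySem.Dict.mk e.2).getD "parents" [])) p.2 then support + 1 else support)
              0))
      counts
    = gm.foldl
      (fun (counts : PySem.Dict String Int) e =>
        match (PySem.Dict.mk e.2).getD "parents" [] with
        | [] => counts
        | p0 :: rest =>
            counts.insert e.1
              (PySem.Set.len (pvInterLoop (pvIndex pt) rest ((pvIndex pt).getD p0 PySem.Set.empty))))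
      counts := by
  induction gm generalizing counts with
  | nil => rfl
  | cons e gm ih =>
      simp only [List.foldl_cons]
      cases hp : (PySem.Dict.mk e.2).getD "parents" [] with
      | nil =>
          simp only [List.isEmpty_nil, if_true]
          apply ih
      | cons p0 rest =>
          simp only [List.isEmpty_cons, Bool.false_eq_true, if_false]
          rw [← pv_support_eq pt p0 rest]
          apply ih

-- ===== VERDICT (by name: the statement is the Claim_ definition above) =====
theorem count_parent_context_support_spec : Claim_equal_count_parent_context_support := by
  intro pt gm _
  unfold Spec_count_parent_context_support count_parent_context_support count_parent_context_support_alt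
  exact congrArg PySem.Dict.items (pv_fold_eq pt gm PySem.Dict.empty)
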